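-- pv_equiv track=rewrite | github.com/ParadigmEngine/ParadigmEngine.github.io | .github/generate.py | _git_entry_to_dict
-- ===== SOURCE A (Python) =====
-- def _git_entry_to_dict(values, prefix=None):
--     results = dict()
--     for value in values:
--         name = (value[1].split("^", maxsplit=1)[0]).lstrip("\t ")
--         if prefix is not None:
--             name = name[len(prefix) :] if name.startswith(prefix) else name
--         if "^" in value[1] or name not in results:
--             results[name] = value[0]
--     return results
-- ===== SOURCE B (Python) =====
-- def _git_entry_to_dict(values, prefix=None):
--     def name_of(raw):
--         name = raw.split("^", maxsplit=1)[0].lstrip("\t ")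
--         if prefix is not None and name.startswith(prefix):
--             name = name[len(prefix):]
--         return name
--     triples = [(name_of(v[1]), v[0], "^" in v[1]) for v in values]
--     results = {}
--     for name, val, _ in triples:
--         if name not in results:
--             results[name] = val
--     for name, val, caret in triples:
--         if caret:
--             results[name] = val
--     return results
-- ===== Notes on version B (the rewrite author's own statement) =====
-- stated objective: alternative
-- what changed: A's single fused loop with the combined caret-or-absent overwrite condition is replaced by precomputing (name, value, has_caret) triples and running two plain passes: pass one sets first-occurrence defaults, pass two lets the last caret entry override.
import Mathlib
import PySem

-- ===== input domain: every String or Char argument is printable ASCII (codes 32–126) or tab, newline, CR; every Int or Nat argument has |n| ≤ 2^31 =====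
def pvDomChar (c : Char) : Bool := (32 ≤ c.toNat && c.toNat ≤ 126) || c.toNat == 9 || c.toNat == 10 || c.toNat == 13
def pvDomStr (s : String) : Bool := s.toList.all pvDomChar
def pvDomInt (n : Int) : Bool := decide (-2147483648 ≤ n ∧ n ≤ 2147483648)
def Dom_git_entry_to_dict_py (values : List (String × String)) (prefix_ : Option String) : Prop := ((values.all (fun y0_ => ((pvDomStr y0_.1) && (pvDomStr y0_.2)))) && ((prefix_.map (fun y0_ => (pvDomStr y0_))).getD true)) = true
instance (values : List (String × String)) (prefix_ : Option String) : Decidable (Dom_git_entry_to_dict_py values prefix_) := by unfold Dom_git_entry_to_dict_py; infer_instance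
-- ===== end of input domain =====

-- B replaces A's single loop (caret-or-absent overwrite) by a precomputed triple list and two
-- plain passes — first-occurrence defaults, then caret overrides — a different decomposition
-- of the same dict-building task (objective: alternative; return value proved equal).


-- ===== PORT A =====
-- name = value[1].split("^", maxsplit=1)[0].lstrip("\t "), then the optional prefix strip.
-- This exact code is shared by both Pythons (B's helper name_of is the same lines).
-- .lstrip("\t ") is ported by hand as dropWhile over the chars (exact: Python drops exactly
-- the leading characters that are '\t' or ' ').
def pvEntryName (raw : String) (prefix_ : Option String) : String :=
  let parts := (PySem.Str.splitMax? raw "^" 1).getD [raw]   -- sep "^" ≠ "", so never none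
  let base := parts.headD ""                                -- split(...) is nonempty, [0] is its head
  let name := String.ofList (base.toList.dropWhile (fun c => c == '\t' || c == ' '))
  match prefix_ with
  | none => name
  | some p =>
      if PySem.Str.startswith name p then PySem.Str.slice name (some (PySem.Str.len p)) none
      else name

def git_entry_to_dict_py (values : List (String × String)) (prefix_ : Option String) : List (String × String) :=
  (values.foldl
    (fun (results : PySem.Dict String String) value =>
      let name := pvEntryName value.2 prefix_
      if PySem.Str.isIn "^" value.2 || !(results.contains name) then results.insert name value.1
      else results)
    PySem.Dict.empty).items

-- ===== PORT B =====
def git_entry_to_dict_py_alt (values : List (String × String)) (prefix_ : Option String) : List (String × String) :=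
  let triples := values.map (fun v => (pvEntryName v.2 prefix_, v.1, PySem.Str.isIn "^" v.2))
  let pass1 := triples.foldl
    (fun (results : PySem.Dict String String) t =>
      if results.contains t.1 then results else results.insert t.1 t.2.1)
    PySem.Dict.empty
  let pass2 := triples.foldl
    (fun (results : PySem.Dict String String) t =>
      if t.2.2 then results.insert t.1 t.2.1 else results)
    pass1
  pass2.items

-- ===== PRECONDITION & SPEC =====
def Spec_git_entry_to_dict_py (values : List (String × String)) (prefix_ : Option String) (out : List (String × String)) : Prop := out = git_entry_to_dict_py_alt values prefix_
instance (values : List (String × String)) (prefix_ : Option String) (out : List (String × String)) : Decidable (Spec_git_entry_to_dict_py values prefix_ out) := by unfold Spec_git_entry_to_dict_py; infer_instance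

-- ===== CLAIM (what is proved, stated in full; the proofs are below) =====
def Claim_equal_git_entry_to_dict_py : Prop := ∀ (values : List (String × String)) (prefix_ : Option String), Dom_git_entry_to_dict_py values prefix_ → Spec_git_entry_to_dict_py values prefix_ (git_entry_to_dict_py values prefix_)

-- ===== LEMMAS AND PROOFS =====

-- A's combined step on a triple, B's pass-1 step (setdefault-like) and pass-2 step (caret override).
def pvStepA (d : PySem.Dict String String) (t : String × String × Bool) : PySem.Dict String String :=
  if t.2.2 || !(d.contains t.1) then d.insert t.1 t.2.1 else d
def pvStepS (d : PySem.Dict String String) (t : String × String × Bool) : PySem.Dict String String :=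
  if d.contains t.1 then d else d.insert t.1 t.2.1
def pvStepT (d : PySem.Dict String String) (t : String × String × Bool) : PySem.Dict String String :=
  if t.2.2 then d.insert t.1 t.2.1 else d

lemma pvStepA_eq (d : PySem.Dict String String) (t : String × String × Bool) :
    pvStepA d t = pvStepT (pvStepS d t) t := by
  unfold pvStepA pvStepS pvStepT
  rcases t with ⟨n, v, c⟩
  cases c <;> cases hc : d.contains n <;>
    simp [PySem.Dict.insert_insert_self]

lemma pvContains_stepS (d : PySem.Dict String String) (t : String × String × Bool) (k : String)
    (h : d.contains k = true) : (pvStepS d t).contains k = true := by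
  unfold pvStepS
  split
  · exact h
  · simp [PySem.Dict.contains_insert, h]

lemma pvContains_stepS_self (d : PySem.Dict String String) (t : String × String × Bool) :
    (pvStepS d t).contains t.1 = true := by
  unfold pvStepS
  split
  · assumption
  · exact PySem.Dict.contains_insert_self _ _ _

-- insert at an existing key and insert at a fresh key commute (the existing-key insert only
-- rewrites in place; the fresh one appends)
lemma pvInsert_comm (d : PySem.Dict String String) (nx ny vx vy : String)
    (hx : d.contains nx = true) (hy : d.contains ny = false) :
    (d.insert nx vx).insert ny vy = (d.insert ny vy).insert nx vx := by
  have hne : ny ≠ nx := fun h => by simp [h, hx] at hy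
  apply PySem.Dict.ext
  have h1 : (d.insert nx vx).contains ny = false := by
    simp [PySem.Dict.contains_insert, hy, hne]
  have h2 : (d.insert ny vy).contains nx = true := by
    simp [PySem.Dict.contains_insert, hx]
  rw [PySem.Dict.items_insert_of_not_contains _ _ h1,
      PySem.Dict.items_insert_of_contains _ _ hx,
      PySem.Dict.items_insert_of_contains _ _ h2,
      PySem.Dict.items_insert_of_not_contains _ _ hy]
  simp [List.map_append, hne]

-- a pass-2 step at a key already present commutes with any pass-1 step
lemma pvStep_comm (d : PySem.Dict String String) (x y : String × String × Bool)
    (hx : d.contains x.1 = true) :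
    pvStepS (pvStepT d x) y = pvStepT (pvStepS d y) x := by
  rcases x with ⟨nx, vx, cx⟩
  rcases y with ⟨ny, vy, cy⟩
  cases cx with
  | false => simp [pvStepT]
  | true =>
    by_cases hcy : d.contains ny = true
    · have h1 : (d.insert nx vx).contains ny = true := by
        simp [PySem.Dict.contains_insert, hcy]
      simp [pvStepS, pvStepT, h1, hcy]
    · have hcy' : d.contains ny = false := by simpa using hcy
      have hne : ny ≠ nx := fun h => by simp [h, hx] at hcy'
      have h1 : (d.insert nx vx).contains ny = false := by
        simp [PySem.Dict.contains_insert, hcy', hne]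
      simp only [pvStepS, pvStepT, h1, hcy', if_true, Bool.false_eq_true, if_false]
      exact pvInsert_comm d nx ny vx vy hx hcy'

-- push one pass-2 step across a whole pass-1 run (the key is already present)
lemma pvPush (ts : List (String × String × Bool)) (d : PySem.Dict String String)
    (x : String × String × Bool) (hx : d.contains x.1 = true) :
    ts.foldl pvStepS (pvStepT d x) = pvStepT (ts.foldl pvStepS d) x := by
  induction ts generalizing d with
  | nil => rfl
  | cons y rest ih =>
    simp only [List.foldl_cons]
    rw [pvStep_comm d x y hx]
    exact ih (pvStepS d y) (pvContains_stepS d y x.1 hx)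

-- A's one fused loop equals B's two passes, for any starting dict
lemma pvTwoPass (ts : List (String × String × Bool)) (d : PySem.Dict String String) :
    ts.foldl pvStepA d = ts.foldl pvStepT (ts.foldl pvStepS d) := by
  induction ts generalizing d with
  | nil => rfl
  | cons x rest ih =>
    simp only [List.foldl_cons]
    rw [ih, pvStepA_eq, pvPush rest (pvStepS d x) x (pvContains_stepS_self d x)]

-- ===== VERDICT (by name: the statement is the Claim_ definition above) =====
theorem git_entry_to_dict_py_spec : Claim_equal_git_entry_to_dict_py := by
  intro values prefix_ _
  have hA : git_entry_to_dict_py values prefix_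
      = ((values.map (fun v => (pvEntryName v.2 prefix_, v.1, PySem.Str.isIn "^" v.2))).foldl
          pvStepA PySem.Dict.empty).items := by
    unfold git_entry_to_dict_py
    rw [List.foldl_map]
    rfl
  show git_entry_to_dict_py values prefix_ = git_entry_to_dict_py_alt values prefix_
  rw [hA, pvTwoPass]
  rfl
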